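-- pv_equiv track=rewrite | github.com/GabrielOWO799/personal-assistant | scripts/ai_toy_weekly_search.py | filter_by_source
-- ===== SOURCE A (Python) =====
-- def filter_by_source(results):
--     """按来源优先级筛选"""
--     priority_sources = {
--         'high': ['kickstarter.com', 'indiegogo.com', 'techcrunch.com', 'theverge.com', 'toybook.com'],
--         'medium': ['36kr.com', 'itjuzi.com', 'iimedia.cn', 'sina.com.cn', 'qq.com'],
--         'low': ['zhihu.com', 'csdn.net', 'github.com']
--     }
--
--     filtered = {'high': [], 'medium': [], 'low': []}
--
--     for result in results:
--         url = result.get('url', '')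
--         for level, domains in priority_sources.items():
--             if any(domain in url for domain in domains):
--                 filtered[level].append(result)
--                 break
--         else:
--             filtered['low'].append(result)
--
--     # 按优先级合并
--     return filtered['high'] + filtered['medium'] + filtered['low']
-- ===== SOURCE B (Python) =====
-- def filter_by_source(results):
--     """按来源优先级筛选"""
--     high = ['kickstarter.com', 'indiegogo.com', 'techcrunch.com', 'theverge.com', 'toybook.com']
--     medium = ['36kr.com', 'itjuzi.com', 'iimedia.cn', 'sina.com.cn', 'qq.com']
--
--     def rank(result):
--         url = result.get('url', '')
--         if any(domain in url for domain in high):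
--             return 0
--         if any(domain in url for domain in medium):
--             return 1
--         return 2  # explicit 'low' domains and unmatched urls alike
--
--     return sorted(results, key=rank)
-- ===== Notes on version B (the rewrite author's own statement) =====
-- stated objective: simpler
-- what changed: Replaces the three-bucket dict accumulation with a break/else for-loop by a numeric rank function (0 high, 1 medium, 2 low/unmatched) and a single stable sorted(results, key=rank), whose stability reproduces the bucket-then-concatenate order.
import Mathlib
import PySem

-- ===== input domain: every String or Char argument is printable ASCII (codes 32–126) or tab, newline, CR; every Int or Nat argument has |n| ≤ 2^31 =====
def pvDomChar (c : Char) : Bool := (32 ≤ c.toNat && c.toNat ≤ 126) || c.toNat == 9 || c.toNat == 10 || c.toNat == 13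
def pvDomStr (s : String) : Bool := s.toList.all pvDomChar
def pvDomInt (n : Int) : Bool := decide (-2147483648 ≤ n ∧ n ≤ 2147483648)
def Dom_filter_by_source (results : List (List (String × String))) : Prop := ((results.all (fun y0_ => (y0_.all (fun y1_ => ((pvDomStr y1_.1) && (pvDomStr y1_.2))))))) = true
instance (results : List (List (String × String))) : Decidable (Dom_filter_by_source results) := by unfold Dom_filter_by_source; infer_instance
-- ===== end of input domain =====

-- B replaces A's three-bucket dict loop by a rank function and one stable sort (simpler decomposition).


-- ===== PORT A =====
-- priority_sources.items(), as the literal insertion-ordered item list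
def pvLevelsA : List (String × List String) :=
  [("high", ["kickstarter.com", "indiegogo.com", "techcrunch.com", "theverge.com", "toybook.com"]),
   ("medium", ["36kr.com", "itjuzi.com", "iimedia.cn", "sina.com.cn", "qq.com"]),
   ("low", ["zhihu.com", "csdn.net", "github.com"])]

-- the inner 'for level, domains …: if any(…): … break' loop: first level whose domains hit url; none = the for-else
def pvClassifyA (url : String) : List (String × List String) → Option String
  | [] => none
  | (level, domains) :: rest =>
      if domains.any (fun domain => PySem.Str.isIn domain url) then some level
      else pvClassifyA url rest

def filter_by_source (results : List (List (String × String))) : List (List (String × String)) :=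
  let filtered := results.foldl
    (fun (f : PySem.Dict String (List (List (String × String)))) result =>
      let url := PySem.Dict.getD (PySem.Dict.mk result) "url" ""
      -- filtered[level].append(result); the three keys are always present, so modify-with-default is exact
      match pvClassifyA url pvLevelsA with
      | some level => f.modify level [] (fun xs => xs ++ [result])
      | none => f.modify "low" [] (fun xs => xs ++ [result]))
    (PySem.Dict.mk [("high", []), ("medium", []), ("low", [])])
  -- filtered['high'] + filtered['medium'] + filtered['low']; the keys are always present, so getD is exact
  filtered.getD "high" [] ++ filtered.getD "medium" [] ++ filtered.getD "low" []

-- ===== PORT B =====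
def pvHighB : List String := ["kickstarter.com", "indiegogo.com", "techcrunch.com", "theverge.com", "toybook.com"]
def pvMediumB : List String := ["36kr.com", "itjuzi.com", "iimedia.cn", "sina.com.cn", "qq.com"]

def pvUrl (result : List (String × String)) : String :=
  PySem.Dict.getD (PySem.Dict.mk result) "url" ""

def pvRank (result : List (String × String)) : Int :=
  if pvHighB.any (fun domain => PySem.Str.isIn domain (pvUrl result)) then 0
  else if pvMediumB.any (fun domain => PySem.Str.isIn domain (pvUrl result)) then 1
  else 2

def filter_by_source_alt (results : List (List (String × String))) : List (List (String × String)) :=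
  PySem.List.sorted results pvRank

-- ===== PRECONDITION & SPEC =====
def Spec_filter_by_source (results : List (List (String × String))) (out : List (List (String × String))) : Prop := out = filter_by_source_alt results
instance (results : List (List (String × String))) (out : List (List (String × String))) : Decidable (Spec_filter_by_source results out) := by unfold Spec_filter_by_source; infer_instance

-- ===== CLAIM (what is proved, stated in full; the proofs are below) =====
def Claim_equal_filter_by_source : Prop := ∀ (results : List (List (String × String))), Dom_filter_by_source results → Spec_filter_by_source results (filter_by_source results)

-- ===== LEMMAS AND PROOFS =====

-- insertBy passes over a prefix it does not go before
theorem pv_insertBy_append {α : Type} (before : α → α → Bool) (x : α) (p s : List α)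
    (h : ∀ y ∈ p, before x y = false) :
    PySem.List.insertBy before x (p ++ s) = p ++ PySem.List.insertBy before x s := by
  induction p with
  | nil => simp
  | cons a t ih =>
      simp only [List.cons_append, PySem.List.insertBy, h a (by simp)]
      simp only [ih (fun y hy => h y (by simp [hy]))]
      simp

-- insertBy goes to the front when it goes before everything (also for the empty list)
theorem pv_insertBy_front {α : Type} (before : α → α → Bool) (x : α) (s : List α)
    (h : ∀ y ∈ s, before x y = true) :
    PySem.List.insertBy before x s = x :: s := by
  cases s with
  | nil => rfl
  | cons a t => simp [PySem.List.insertBy, h a (by simp)]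

-- rank takes only the values 0, 1, 2
theorem pv_rank_cases (x : List (String × String)) : pvRank x = 0 ∨ pvRank x = 1 ∨ pvRank x = 2 := by
  unfold pvRank; split_ifs <;> simp

-- the stable insertion-sort loop keeps the three rank buckets concatenated in order
theorem pv_sort_buckets (l : List (List (String × String)))
    (b0 b1 b2 : List (List (String × String)))
    (h0 : ∀ y ∈ b0, pvRank y = 0) (h1 : ∀ y ∈ b1, pvRank y = 1) (h2 : ∀ y ∈ b2, pvRank y = 2) :
    l.foldl (fun acc x => PySem.List.insertBy (fun a b => decide (pvRank a < pvRank b)) x acc)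
      (b0 ++ b1 ++ b2)
    = (b0 ++ l.filter (fun x => pvRank x == 0)) ++ (b1 ++ l.filter (fun x => pvRank x == 1))
      ++ (b2 ++ l.filter (fun x => pvRank x == 2)) := by
  induction l generalizing b0 b1 b2 with
  | nil => simp
  | cons x t ih =>
      rcases pv_rank_cases x with hx | hx | hx
      · have hins : PySem.List.insertBy (fun a b => decide (pvRank a < pvRank b)) x (b0 ++ b1 ++ b2)
            = (b0 ++ [x]) ++ b1 ++ b2 := by
          rw [List.append_assoc,
            pv_insertBy_append _ x b0 (b1 ++ b2) (fun y hy => by simp [hx, h0 y hy]),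
            pv_insertBy_front _ x (b1 ++ b2) (fun y hy => by
              rcases List.mem_append.mp hy with hy | hy
              · simp [hx, h1 y hy]
              · simp [hx, h2 y hy])]
          simp
        simp only [List.foldl_cons, hins]
        rw [ih (b0 ++ [x]) b1 b2
          (fun y hy => by
            rcases List.mem_append.mp hy with hy | hy
            · exact h0 y hy
            · simp at hy; simp [hy, hx]) h1 h2]
        simp [hx]
      · have hins : PySem.List.insertBy (fun a b => decide (pvRank a < pvRank b)) x (b0 ++ b1 ++ b2)
            = b0 ++ (b1 ++ [x]) ++ b2 := by
          rw [List.append_assoc, List.append_assoc,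
            pv_insertBy_append _ x b0 (b1 ++ b2) (fun y hy => by simp [hx, h0 y hy]),
            pv_insertBy_append _ x b1 b2 (fun y hy => by simp [hx, h1 y hy]),
            pv_insertBy_front _ x b2 (fun y hy => by simp [hx, h2 y hy])]
          simp
        simp only [List.foldl_cons, hins]
        rw [ih b0 (b1 ++ [x]) b2 h0
          (fun y hy => by
            rcases List.mem_append.mp hy with hy | hy
            · exact h1 y hy
            · simp at hy; simp [hy, hx]) h2]
        simp [hx]
      · have hall : ∀ y ∈ b0 ++ b1 ++ b2, (fun a b => decide (pvRank a < pvRank b)) x y = false := by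
          intro y hy
          rcases List.mem_append.mp hy with hy | hy
          · rcases List.mem_append.mp hy with hy | hy
            · simp [hx, h0 y hy]
            · simp [hx, h1 y hy]
          · simp [hx, h2 y hy]
        have hins : PySem.List.insertBy (fun a b => decide (pvRank a < pvRank b)) x (b0 ++ b1 ++ b2)
            = b0 ++ b1 ++ (b2 ++ [x]) := by
          have h := pv_insertBy_append (fun a b => decide (pvRank a < pvRank b)) x (b0 ++ b1 ++ b2) [] hall
          simp only [List.append_nil] at h
          rw [h]
          simp [PySem.List.insertBy]
        simp only [List.foldl_cons, hins]
        rw [ih b0 b1 (b2 ++ [x]) h0 h1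
          (fun y hy => by
            rcases List.mem_append.mp hy with hy | hy
            · exact h2 y hy
            · simp at hy; simp [hy, hx])]
        simp [hx]

-- one step of A's loop, on a dict in bucket shape, expressed through pvRank
theorem pv_stepA (b0 b1 b2 : List (List (String × String))) (x : List (String × String)) :
    (match pvClassifyA (PySem.Dict.getD (PySem.Dict.mk x) "url" "") pvLevelsA with
      | some level => (PySem.Dict.mk [("high", b0), ("medium", b1), ("low", b2)]).modify level []
          (fun xs => xs ++ [x])
      | none => (PySem.Dict.mk [("high", b0), ("medium", b1), ("low", b2)]).modify "low" []
          (fun xs => xs ++ [x]))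
    = PySem.Dict.mk [("high", if pvRank x == 0 then b0 ++ [x] else b0),
                     ("medium", if pvRank x == 1 then b1 ++ [x] else b1),
                     ("low", if pvRank x == 2 then b2 ++ [x] else b2)] := by
  simp only [pvClassifyA, pvLevelsA, pvRank, pvHighB, pvMediumB, pvUrl]
  split_ifs <;>
    simp_all [PySem.Dict.modify, PySem.Dict.insert, PySem.Dict.getD, PySem.Dict.get?,
      PySem.Dict.contains]

-- A's whole loop in bucket shape
theorem pv_loopA (l : List (List (String × String))) (b0 b1 b2 : List (List (String × String))) :
    l.foldl (fun (f : PySem.Dict String (List (List (String × String)))) result =>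
      let url := PySem.Dict.getD (PySem.Dict.mk result) "url" ""
      match pvClassifyA url pvLevelsA with
      | some level => f.modify level [] (fun xs => xs ++ [result])
      | none => f.modify "low" [] (fun xs => xs ++ [result]))
      (PySem.Dict.mk [("high", b0), ("medium", b1), ("low", b2)])
    = PySem.Dict.mk [("high", b0 ++ l.filter (fun x => pvRank x == 0)),
                     ("medium", b1 ++ l.filter (fun x => pvRank x == 1)),
                     ("low", b2 ++ l.filter (fun x => pvRank x == 2))] := by
  induction l generalizing b0 b1 b2 with
  | nil => simp
  | cons x t ih =>
      simp only [List.foldl_cons]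
      rw [show (let url := PySem.Dict.getD (PySem.Dict.mk x) "url" ""
          match pvClassifyA url pvLevelsA with
          | some level => (PySem.Dict.mk [("high", b0), ("medium", b1), ("low", b2)]).modify level []
              (fun xs => xs ++ [x])
          | none => (PySem.Dict.mk [("high", b0), ("medium", b1), ("low", b2)]).modify "low" []
              (fun xs => xs ++ [x]))
        = PySem.Dict.mk [("high", if pvRank x == 0 then b0 ++ [x] else b0),
            ("medium", if pvRank x == 1 then b1 ++ [x] else b1),
            ("low", if pvRank x == 2 then b2 ++ [x] else b2)] from pv_stepA b0 b1 b2 x, ih]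
      rcases pv_rank_cases x with hx | hx | hx <;> simp [hx]

-- ===== VERDICT (by name: the statement is the Claim_ definition above) =====
theorem filter_by_source_spec : Claim_equal_filter_by_source := by
  intro results _
  unfold Spec_filter_by_source filter_by_source filter_by_source_alt
  rw [pv_loopA results [] [] []]
  rw [PySem.List.sorted_eq_foldl_insertBy]
  rw [show ([] : List (List (String × String))) = [] ++ [] ++ [] from rfl,
    pv_sort_buckets results [] [] [] (by simp) (by simp) (by simp)]
  simp [PySem.Dict.getD, PySem.Dict.get?]
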